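-- pv_equiv track=rewrite | github.com/joshanashakya/dissertation | workspace/dataset/java-python/GeeksForGeeks/3850/A/2.py | longestSubArr
-- ===== SOURCE A (Python) =====
-- def binarySearch(searchSpace, s, e, num):
--
--     while (s <= e):
--         mid = (s + e) // 2
--
--         if searchSpace[mid] >= num :
--             ans = mid
--             e = mid - 1
--
--         else:
--             s = mid + 1
--
--     return ans
--
-- def longestSubArr(arr, n):
--
--     # Search space for the
--     # potential first elements.
--     searchSpace = [None] * n
--
--     # It will store the Indexes
--     # of the elements of search
--     # space in the original array.
--     index = [None] * n
--
--     # Initially the search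
--     # space is empty.
--     j = 0
--     ans = 0
--
--     for i in range(n):
--
--         # We will add an ith element
--         # in the search space if the
--         # search space is empty or if
--         # the ith element is greater
--         # than the last element of
--         # the search space.
--         if (j == 0 or searchSpace[j - 1] < arr[i]) :
--             searchSpace[j] = arr[i]
--             index[j] = i
--             j += 1
--
--         # we will search for the index
--         # first element in the search
--         # space and we will use it
--         # find the index of it in the
--         # original array.
--         idx = binarySearch(searchSpace, 0,
--                            j - 1, arr[i])
--
--         # Update the answer if the length
--         # of the subarray is greater than
--         # the previously calculated lengths.
--         ans = max(ans, i - index[idx] + 1)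
--
--     return ans
-- ===== SOURCE B (Python) =====
-- def longestSubArr(arr, n):
--     # Naive form: for each i, scan left-to-right for the first
--     # element >= arr[i]; that is the leftmost possible start.
--     ans = 0
--     for i in range(n):
--         x = arr[i]
--         p = 0
--         while arr[p] < x:
--             p += 1
--         ans = max(ans, i - p + 1)
--     return ans
-- ===== Notes on version B (the rewrite author's own statement) =====
-- stated objective: simpler
-- what changed: Replaced the search-space stack plus hand-written binary search with a direct quadratic scan: for each i, walk from the left to the first element >= arr[i] and take i - p + 1.
import Mathlib
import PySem

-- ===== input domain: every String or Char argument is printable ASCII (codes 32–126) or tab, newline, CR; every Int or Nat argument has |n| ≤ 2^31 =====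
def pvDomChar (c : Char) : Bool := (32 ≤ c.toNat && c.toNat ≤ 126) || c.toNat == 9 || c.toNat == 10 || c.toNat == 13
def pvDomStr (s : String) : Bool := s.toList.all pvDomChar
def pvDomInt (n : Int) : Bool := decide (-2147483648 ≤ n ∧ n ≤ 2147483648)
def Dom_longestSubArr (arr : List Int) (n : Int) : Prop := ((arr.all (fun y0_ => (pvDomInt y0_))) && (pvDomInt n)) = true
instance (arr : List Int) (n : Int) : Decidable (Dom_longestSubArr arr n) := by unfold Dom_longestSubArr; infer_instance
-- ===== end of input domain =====

-- B replaces A's incremental search-space stack + hand-written binary search by a direct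
-- quadratic scan (for each i, walk left-to-right to the first element >= arr[i]): simpler, not faster.

-- ===== PORT A =====
-- while (s <= e): mid = (s+e)//2; if searchSpace[mid] >= num: ans = mid; e = mid-1 else s = mid+1; return ans
-- `none` result = the Python raises there (IndexError / TypeError on a None entry / UnboundLocalError on ans).
def bsearch (ss : List (Option Int)) (s e : Int) (num : Int) (ans : Option Int) : Option Int :=
  if h : s ≤ e then
    -- mid = (s + e) // 2, written inline
    match PySem.List.pyGet? ss (PySem.Int.floordiv (s + e) 2) with
    | none => none            -- IndexError
    | some none => none       -- comparing None with an int: TypeError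
    | some (some v) =>
      if num ≤ v then
        bsearch ss s (PySem.Int.floordiv (s + e) 2 - 1) num (some (PySem.Int.floordiv (s + e) 2))
      else bsearch ss (PySem.Int.floordiv (s + e) 2 + 1) e num ans
  else ans
termination_by (e + 1 - s).toNat
decreasing_by
  · have := PySem.Int.floordiv_two_mid_bounds h; omega
  · have := PySem.Int.floordiv_two_mid_bounds h; omega

-- one iteration of A's `for i in range(n)` loop, split into named stages (state =
-- (searchSpace, index, j, ans); `none` = the Python raised an exception).
-- stage: the tuple (searchSpace[j], index[j]) after the two assignments; j += 1
def aSetPair (j : Int) (ss? il? : Option (List (Option Int))) :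
    Option (List (Option Int) × List (Option Int) × Int) :=
  match ss?, il? with
  | some ss', some il' => some (ss', il', j + 1)
  | _, _ => none

-- stage: the `searchSpace[j - 1] < arr[i]` test (j ≠ 0)
def aUpd (ss il : List (Option Int)) (j ai i : Int) (last? : Option (Option Int)) :
    Option (List (Option Int) × List (Option Int) × Int) :=
  match last? with
  | none => none            -- IndexError
  | some none => none       -- comparing None with an int: TypeError
  | some (some last) =>
    if last < ai then
      aSetPair j (PySem.List.pySet? ss j (some ai)) (PySem.List.pySet? il j (some i))
    else some (ss, il, j)

-- stage: `index[idx]` and the `ans = max(...)` update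
def aAns (ss' il' : List (Option Int)) (j' ans i : Int) (pidx? : Option (Option Int)) :
    Option (List (Option Int) × List (Option Int) × Int × Int) :=
  match pidx? with
  | none => none            -- IndexError
  | some none => none       -- int - None: TypeError
  | some (some pidx) => some (ss', il', j', max ans (i - pidx + 1))

-- stage: the result of the binary search
def aBs (ss' il' : List (Option Int)) (j' ans i : Int) (idx? : Option Int) :
    Option (List (Option Int) × List (Option Int) × Int × Int) :=
  match idx? with
  | none => none            -- binarySearch raised
  | some idx => aAns ss' il' j' ans i (PySem.List.pyGet? il' idx)

-- stage: run the binary search on the (possibly) extended search space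
def aSearch (ans i ai : Int) (upd : Option (List (Option Int) × List (Option Int) × Int)) :
    Option (List (Option Int) × List (Option Int) × Int × Int) :=
  match upd with
  | none => none
  | some (ss', il', j') => aBs ss' il' j' ans i (bsearch ss' 0 (j' - 1) ai none)

-- stage: `arr[i]` fetched; the `j == 0 or searchSpace[j-1] < arr[i]` branch
def aBody (ss il : List (Option Int)) (j ans i : Int) (ai? : Option Int) :
    Option (List (Option Int) × List (Option Int) × Int × Int) :=
  match ai? with
  | none => none            -- IndexError
  | some ai =>
    aSearch ans i ai
      (if j = 0 then
        aSetPair j (PySem.List.pySet? ss j (some ai)) (PySem.List.pySet? il j (some i))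
      else aUpd ss il j ai i (PySem.List.pyGet? ss (j - 1)))

def aStep (arr : List Int) (st : Option (List (Option Int) × List (Option Int) × Int × Int)) (i : Int) :
    Option (List (Option Int) × List (Option Int) × Int × Int) :=
  match st with
  | none => none
  | some (ss, il, j, ans) => aBody ss il j ans i (PySem.List.pyGet? arr i)

def longestSubArr (arr : List Int) (n : Int) : Int :=
  match (PySem.List.pyRange 0 n 1).foldl (aStep arr)
      (some (List.replicate n.toNat none, List.replicate n.toNat none, 0, 0)) with
  | some (_, _, _, ans) => ans
  | none => 0                 -- unreachable under Pre_: the Python raised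

-- ===== PORT B =====
-- `while arr[p] < x: p += 1`, started at p = 0; `none` = IndexError.
def findGE (arr : List Int) (x : Int) (p : Nat) : Option Int :=
  match h : PySem.List.pyGet? arr (p : Int) with
  | none => none
  | some v => if v < x then findGE arr x (p + 1) else some (p : Int)
termination_by arr.length - p
decreasing_by
  simp only [PySem.List.pyGet?_natCast] at h
  obtain ⟨hlt, -⟩ := List.getElem?_eq_some_iff.mp h
  omega

def bStep (arr : List Int) (ans : Int) (i : Int) : Int :=
  match PySem.List.pyGet? arr i with
  | none => ans               -- unreachable under Pre_: IndexError
  | some x =>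
    match findGE arr x 0 with
    | none => ans             -- unreachable under Pre_: IndexError
    | some p => max ans (i - p + 1)

def longestSubArr_alt (arr : List Int) (n : Int) : Int :=
  (PySem.List.pyRange 0 n 1).foldl (bStep arr) 0

-- ===== PRECONDITION & SPEC =====
-- Pre_ excludes only n > len(arr), where the Python A raises IndexError at arr[i].
def Pre_longestSubArr (arr : List Int) (n : Int) : Prop := n ≤ (arr.length : Int)
instance (arr : List Int) (n : Int) : Decidable (Pre_longestSubArr arr n) := by
  unfold Pre_longestSubArr; infer_instance

def pvWitness_longestSubArr : List Int × Int := ([5, 1, 9, 2], 4)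

def Spec_longestSubArr (arr : List Int) (n : Int) (out : Int) : Prop := out = longestSubArr_alt arr n
instance (arr : List Int) (n : Int) (out : Int) : Decidable (Spec_longestSubArr arr n out) := by unfold Spec_longestSubArr; infer_instance

-- ===== CLAIM (what is proved, stated in full; the proofs are below) =====
def Claim_equal_longestSubArr : Prop := ∀ (arr : List Int) (n : Int), Dom_longestSubArr arr n → Pre_longestSubArr arr n → Spec_longestSubArr arr n (longestSubArr arr n)

-- ===== LEMMAS AND PROOFS =====

-- `recs a m` = the indices k < m whose element strictly exceeds every earlier element:
-- exactly the indices A keeps in `index[0:j]` (and whose values it keeps in `searchSpace[0:j]`).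
def recPred (a : List Int) (k : Nat) : Bool := (List.range k).all (fun q => decide (a.getD q 0 < a.getD k 0))

def recs (a : List Int) (m : Nat) : List Nat := (List.range m).filter (recPred a)

lemma recs_succ (a : List Int) (m : Nat) :
    recs a (m + 1) = recs a m ++ if recPred a m then [m] else [] := by
  simp [recs, List.range_succ, List.filter_append]
  split <;> simp_all

lemma mem_recs (a : List Int) (m k : Nat) :
    k ∈ recs a m ↔ k < m ∧ ∀ q < k, a.getD q 0 < a.getD k 0 := by
  simp [recs, recPred, List.mem_filter, List.mem_range, List.all_eq_true]

lemma recs_sorted (a : List Int) (m : Nat) : (recs a m).Pairwise (· < ·) :=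
  List.Pairwise.filter _ (List.pairwise_lt_range)

lemma length_recs_le (a : List Int) (m : Nat) : (recs a m).length ≤ m := by
  have := List.length_filter_le (recPred a) (List.range m)
  simpa using this

lemma zero_mem_recs (a : List Int) (m : Nat) (hm : 0 < m) : 0 ∈ recs a m := by
  rw [mem_recs]; exact ⟨hm, by omega⟩

lemma recs_length_pos (a : List Int) (m : Nat) (hm : 0 < m) : 0 < (recs a m).length :=
  List.length_pos_of_mem (zero_mem_recs a m hm)

-- every element of the prefix is dominated by some record
lemma exists_rec_ge (a : List Int) (m : Nat) :
    ∀ q, q < m → ∃ r ∈ recs a m, a.getD q 0 ≤ a.getD r 0 := by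
  intro q
  induction q using Nat.strong_induction_on with
  | _ q ih =>
    intro hq
    by_cases hrec : ∀ p < q, a.getD p 0 < a.getD q 0
    · exact ⟨q, (mem_recs a m q).mpr ⟨hq, hrec⟩, le_refl _⟩
    · push_neg at hrec
      obtain ⟨p, hp, hge⟩ := hrec
      obtain ⟨r, hr, hle⟩ := ih p hp (by omega)
      exact ⟨r, hr, le_trans hge hle⟩

-- values along the records are strictly increasing (position-wise)
lemma recs_vals_strictMono (a : List Int) (m : Nat) :
    ∀ t1 t2 : Nat, t1 < t2 → t2 < (recs a m).length →
      a.getD ((recs a m).getD t1 0) 0 < a.getD ((recs a m).getD t2 0) 0 := by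
  intro t1 t2 h12 h2
  have h1 : t1 < (recs a m).length := by omega
  have hlt : (recs a m)[t1] < (recs a m)[t2] :=
    (List.pairwise_iff_getElem.mp (recs_sorted a m)) t1 t2 h1 h2 h12
  have hmem : (recs a m)[t2] ∈ recs a m := List.getElem_mem h2
  have := ((mem_recs a m _).mp hmem).2 _ hlt
  simpa [List.getD_eq_getElem?_getD, List.getElem?_eq_getElem, h1, h2] using this

lemma recs_vals_mono (a : List Int) (m : Nat) :
    ∀ t1 t2 : Nat, t1 ≤ t2 → t2 < (recs a m).length →
      a.getD ((recs a m).getD t1 0) 0 ≤ a.getD ((recs a m).getD t2 0) 0 := by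
  intro t1 t2 h12 h2
  rcases Nat.lt_or_ge t1 t2 with h | h
  · exact le_of_lt (recs_vals_strictMono a m t1 t2 h h2)
  · have : t1 = t2 := by omega
    simp [this]

-- the last record's value is the maximum of the prefix
lemma last_rec_max (a : List Int) (m : Nat) (hm : 0 < m) :
    ∀ q, q < m → a.getD q 0 ≤ a.getD ((recs a m).getD ((recs a m).length - 1) 0) 0 := by
  intro q hq
  obtain ⟨r, hr, hle⟩ := exists_rec_ge a m q hq
  obtain ⟨t, ht, hrt⟩ := List.getElem_of_mem hr
  have : a.getD r 0 ≤ a.getD ((recs a m).getD ((recs a m).length - 1) 0) 0 := by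
    have := recs_vals_mono a m t ((recs a m).length - 1) (by omega) (by have := recs_length_pos a m hm; omega)
    simpa [List.getD_eq_getElem?_getD, List.getElem?_eq_getElem, ht, hrt] using this
  exact le_trans hle this

-- A's branch condition (last search-space value < arr[m]) is exactly "m is a record"
lemma branch_iff (a : List Int) (m : Nat) (hm : 0 < m) :
    (a.getD ((recs a m).getD ((recs a m).length - 1) 0) 0 < a.getD m 0) ↔ recPred a m = true := by
  constructor
  · intro hlt
    simp only [recPred, List.all_eq_true, List.mem_range, decide_eq_true_eq]
    intro q hq
    exact lt_of_le_of_lt (last_rec_max a m hm q hq) hlt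
  · intro hrec
    have hlen := recs_length_pos a m hm
    have hmem : (recs a m)[(recs a m).length - 1] ∈ recs a m := List.getElem_mem (by omega)
    have hklt : (recs a m)[(recs a m).length - 1] < m := ((mem_recs a m _).mp hmem).1
    simp only [recPred, List.all_eq_true, List.mem_range, decide_eq_true_eq] at hrec
    have := hrec _ hklt
    simpa [List.getD_eq_getElem?_getD, List.getElem?_eq_getElem, Nat.sub_lt hlen] using this

-- binary-search correctness on a sorted view of the search space
lemma bsearch_correct (ss : List (Option Int)) (L : Nat) (v : Nat → Int)
    (hget : ∀ t : Nat, t < L → PySem.List.pyGet? ss (t : Int) = some (some (v t)))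
    (hmono : ∀ t1 t2 : Nat, t1 ≤ t2 → t2 < L → v t1 ≤ v t2)
    (num : Int) (T : Nat) (hT : T < L) (hge : num ≤ v T) (hmin : ∀ t, t < T → v t < num) :
    ∀ k : Nat, ∀ s e : Int, ∀ acc : Option Int, (e + 1 - s).toNat ≤ k → 0 ≤ s → e < (L : Int) →
      s ≤ (T : Int) → ((T : Int) ≤ e ∨ acc = some (T : Int)) →
      bsearch ss s e num acc = some (T : Int) := by
  intro k
  induction k with
  | zero =>
    intro s e acc hk hs he hsT hacc
    have hse : ¬ s ≤ e := by omega
    rw [bsearch, dif_neg hse]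
    rcases hacc with h | h
    · omega
    · exact h
  | succ k ih =>
    intro s e acc hk hs he hsT hacc
    by_cases hse : s ≤ e
    · rw [bsearch, dif_pos hse]
      have hmid := PySem.Int.floordiv_two_mid_bounds hse
      obtain ⟨m, hm⟩ : ∃ m : Nat, PySem.Int.floordiv (s + e) 2 = (m : Int) :=
        ⟨(PySem.Int.floordiv (s + e) 2).toNat, by omega⟩
      have hmtL : m < L := by omega
      rw [hm]
      simp only [hget m hmtL]
      by_cases hcmp : num ≤ v m
      · simp only [if_pos hcmp]
        have hTmid : (T : Int) ≤ (m : Int) := by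
          by_contra hlt
          have hx : m < T := by omega
          exact absurd hcmp (not_le.mpr (hmin _ hx))
        apply ih _ _ _ (by omega) (by omega) (by omega) (by omega)
        rcases eq_or_lt_of_le hTmid with heq | hlt
        · right; rw [← heq]
        · left; omega
      · simp only [if_neg hcmp]
        have hmidT : (m : Int) < (T : Int) := by
          by_contra hx
          have hTle : T ≤ m := by omega
          exact hcmp (le_trans hge (hmono T m hTle hmtL))
        apply ih _ _ _ (by omega) (by omega) (by omega) (by omega)
        rcases hacc with h1 | h1
        · left; exact h1
        · right; exact h1
    · rw [bsearch, dif_neg hse]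
      rcases hacc with h | h
      · omega
      · exact h

-- B's inner scan finds the leftmost index with value ≥ x
lemma findGE_stop (a : List Int) (x : Int) (T : Nat) (hT : T < a.length) (hx : x ≤ a.getD T 0) :
    findGE a x T = some (T : Int) := by
  rw [findGE]
  split
  case _ h =>
    rw [PySem.List.pyGet?_natCast, List.getElem?_eq_getElem hT] at h
    exact absurd h (by simp)
  case _ v h =>
    rw [PySem.List.pyGet?_natCast, List.getElem?_eq_getElem hT] at h
    have hv : v = a[T] := by injection h; omega
    subst hv
    rw [if_neg (by rw [← List.getD_eq_getElem a 0 hT]; omega)]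

lemma findGE_spec (a : List Int) (x : Int) (T : Nat) (hT : T < a.length) (hx : x ≤ a.getD T 0)
    (hmin : ∀ q, q < T → a.getD q 0 < x) :
    ∀ k p : Nat, T - p ≤ k → p ≤ T → findGE a x p = some (T : Int) := by
  intro k
  induction k with
  | zero =>
    intro p hk hp
    have hpT : p = T := by omega
    subst hpT
    exact findGE_stop _ _ _ hT hx
  | succ k ih =>
    intro p hk hp
    rcases Nat.lt_or_eq_of_le hp with hlt | heq
    · have hplen : p < a.length := by omega
      rw [findGE]
      split
      case _ h =>
        rw [PySem.List.pyGet?_natCast, List.getElem?_eq_getElem hplen] at h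
        exact absurd h (by simp)
      case _ v h =>
        rw [PySem.List.pyGet?_natCast, List.getElem?_eq_getElem hplen] at h
        have hv : v = a[p] := by injection h; omega
        subst hv
        rw [if_pos (by rw [← List.getD_eq_getElem a 0 hplen]; exact hmin p hlt)]
        exact ih (p + 1) (by omega) (by omega)
    · subst heq
      exact findGE_stop _ _ _ hT hx

lemma getD_append_self (R : List Nat) (y : Nat) : (R ++ [y]).getD R.length 0 = y := by
  simp [List.getD_eq_getElem?_getD]

-- the main loop invariant: after m iterations both programs agree, and A's state
-- holds exactly the strict prefix-maxima of arr[0:m]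
lemma loop_inv (a : List Int) (N : Nat) (hN : N ≤ a.length) :
    ∀ m : Nat, m ≤ N →
    ∃ ss il : List (Option Int), ss.length = N ∧ il.length = N ∧
      (∀ t : Nat, t < (recs a m).length →
         PySem.List.pyGet? ss (t : Int) = some (some (a.getD ((recs a m).getD t 0) 0)) ∧
         PySem.List.pyGet? il (t : Int) = some (some (((recs a m).getD t 0 : Nat) : Int))) ∧
      ((List.range m).map (fun k : Nat => (k : Int))).foldl (aStep a)
          (some (List.replicate N none, List.replicate N none, 0, 0))
        = some (ss, il, ((recs a m).length : Int),
            ((List.range m).map (fun k : Nat => (k : Int))).foldl (bStep a) 0) := by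
  intro m
  induction m with
  | zero =>
    intro _
    exact ⟨List.replicate N none, List.replicate N none, List.length_replicate,
      List.length_replicate, by intro t ht; simp [recs] at ht, by simp [recs]⟩
  | succ m ih =>
    intro hm1
    obtain ⟨ss, il, hls, hli, hinv, hfold⟩ := ih (by omega)
    have hmN : m < N := by omega
    have hmlen : m < a.length := by omega
    have hjle : (recs a m).length ≤ m := length_recs_le a m
    have hjnN : (recs a m).length < N := by omega
    -- arr[m]
    have hgm : PySem.List.pyGet? a ((m : Nat) : Int) = some (a.getD m 0) := by
      rw [PySem.List.pyGet?_natCast, List.getElem?_eq_getElem hmlen, List.getD_eq_getElem]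
    -- k* = the leftmost index with arr[k*] >= arr[m]
    have hkx : ∃ y ∈ a, (decide (a.getD m 0 ≤ y)) = true := by
      refine ⟨a[m], List.getElem_mem hmlen, ?_⟩
      rw [List.getD_eq_getElem a 0 hmlen]
      simp
    have hklen : a.findIdx (fun y => decide (a.getD m 0 ≤ y)) < a.length :=
      List.findIdx_lt_length_of_exists hkx
    have hkm : a.findIdx (fun y => decide (a.getD m 0 ≤ y)) ≤ m := by
      by_contra hgt
      have h2 := List.not_of_lt_findIdx (p := fun y => decide (a.getD m 0 ≤ y)) (xs := a)
        (i := m) (by omega)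
      have h3 : ¬ (a.getD m 0 ≤ a[m]) := by simpa using h2
      exact h3 (le_of_eq (List.getD_eq_getElem a 0 hmlen))
    have hkge : a.getD m 0 ≤ a.getD (a.findIdx (fun y => decide (a.getD m 0 ≤ y))) 0 := by
      have := List.findIdx_getElem (w := hklen) (p := fun y => decide (a.getD m 0 ≤ y)) (xs := a)
      simp only [decide_eq_true_eq] at this
      rwa [List.getD_eq_getElem a 0 hklen]
    have hkmin : ∀ q, q < a.findIdx (fun y => decide (a.getD m 0 ≤ y)) → a.getD q 0 < a.getD m 0 := by
      intro q hq
      have hqlen : q < a.length := by omega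
      have h2 := List.not_of_lt_findIdx (p := fun y => decide (a.getD m 0 ≤ y)) (xs := a) hq
      simp only [decide_eq_false_iff_not, not_le] at h2
      rwa [List.getD_eq_getElem a 0 hqlen]
    have hkmem : a.findIdx (fun y => decide (a.getD m 0 ≤ y)) ∈ recs a (m + 1) := by
      rw [mem_recs]
      exact ⟨by omega, fun q hq => lt_of_lt_of_le (hkmin q hq) hkge⟩
    -- T = position of k* in recs a (m+1)
    have hT : (recs a (m + 1)).idxOf (a.findIdx (fun y => decide (a.getD m 0 ≤ y)))
        < (recs a (m + 1)).length := List.idxOf_lt_length_of_mem hkmem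
    have hRT : (recs a (m + 1)).getD
        ((recs a (m + 1)).idxOf (a.findIdx (fun y => decide (a.getD m 0 ≤ y)))) 0
        = a.findIdx (fun y => decide (a.getD m 0 ≤ y)) := by
      rw [List.getD_eq_getElem _ _ hT, List.getElem_idxOf hT]
    have hgeT : a.getD m 0 ≤ a.getD ((recs a (m + 1)).getD
        ((recs a (m + 1)).idxOf (a.findIdx (fun y => decide (a.getD m 0 ≤ y)))) 0) 0 := by
      rw [hRT]; exact hkge
    have hminT : ∀ t, t < (recs a (m + 1)).idxOf (a.findIdx (fun y => decide (a.getD m 0 ≤ y))) →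
        a.getD ((recs a (m + 1)).getD t 0) 0 < a.getD m 0 := by
      intro t ht
      have htlen : t < (recs a (m + 1)).length := by omega
      have hlt : (recs a (m + 1))[t] < (recs a (m + 1))[(recs a (m + 1)).idxOf
          (a.findIdx (fun y => decide (a.getD m 0 ≤ y)))] :=
        (List.pairwise_iff_getElem.mp (recs_sorted a (m + 1))) t _ htlen hT ht
      rw [List.getElem_idxOf hT] at hlt
      rw [List.getD_eq_getElem _ _ htlen]
      exact hkmin _ hlt
    -- B's inner scan finds k*
    have hfind : findGE a (a.getD m 0) 0
        = some ((a.findIdx (fun y => decide (a.getD m 0 ≤ y)) : Nat) : Int) :=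
      findGE_spec a _ _ hklen hkge hkmin _ 0 (Nat.le_refl _) (Nat.zero_le _)
    have hbstep : ∀ ans : Int, bStep a ans ((m : Nat) : Int)
        = max ans (((m : Nat) : Int) - ((a.findIdx (fun y => decide (a.getD m 0 ≤ y)) : Nat) : Int) + 1) := by
      intro ans
      simp only [bStep, hgm, hfind]
    -- unfold one loop iteration on both sides
    simp only [List.range_succ, List.map_append, List.map_cons, List.map_nil,
      List.foldl_append, List.foldl_cons, List.foldl_nil]
    rw [hfold, hbstep]
    by_cases hc : recPred a m = true
    · -- the m-th element is appended to the search space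
      have hR' : recs a (m + 1) = recs a m ++ [m] := by rw [recs_succ, if_pos hc]
      have hlen' : (recs a (m + 1)).length = (recs a m).length + 1 := by rw [hR']; simp
      have hinv' : ∀ t : Nat, t < (recs a (m + 1)).length →
          PySem.List.pyGet? (ss.set (recs a m).length (some (a.getD m 0))) (t : Int) = some (some (a.getD ((recs a (m + 1)).getD t 0) 0)) ∧
          PySem.List.pyGet? (il.set (recs a m).length (some ((m : Nat) : Int))) (t : Int) = some (some (((recs a (m + 1)).getD t 0 : Nat) : Int)) := by
        intro t ht
        rw [hlen'] at ht
        rcases Nat.lt_or_eq_of_le (Nat.le_of_lt_succ ht) with hlt | heq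
        · have hRt : (recs a (m + 1)).getD t 0 = (recs a m).getD t 0 := by
            rw [hR']; exact List.getD_append _ _ 0 t hlt
          refine ⟨?_, ?_⟩
          · rw [PySem.List.pyGet?_natCast, List.getElem?_set_ne (by omega), hRt,
              ← PySem.List.pyGet?_natCast]
            exact (hinv t hlt).1
          · rw [PySem.List.pyGet?_natCast, List.getElem?_set_ne (by omega), hRt,
              ← PySem.List.pyGet?_natCast]
            exact (hinv t hlt).2
        · have hRt : (recs a (m + 1)).getD t 0 = m := by
            rw [heq, hR']; exact getD_append_self _ _
          refine ⟨?_, ?_⟩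
          · rw [PySem.List.pyGet?_natCast, hRt, heq, List.getElem?_set_self (by omega)]
          · rw [PySem.List.pyGet?_natCast, hRt, heq, List.getElem?_set_self (by omega)]
      have hbs : bsearch (ss.set (recs a m).length (some (a.getD m 0))) 0 (((recs a m).length : Int) + 1 - 1) (a.getD m 0) none = some ((((recs a (m + 1)).idxOf (a.findIdx (fun y => decide (a.getD m 0 ≤ y)))) : Nat) : Int) :=
        bsearch_correct (ss.set (recs a m).length (some (a.getD m 0))) (recs a (m + 1)).length
          (fun t => a.getD ((recs a (m + 1)).getD t 0) 0)
          (fun t ht => (hinv' t ht).1) (recs_vals_mono a (m + 1)) (a.getD m 0)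
          ((recs a (m + 1)).idxOf (a.findIdx (fun y => decide (a.getD m 0 ≤ y)))) hT hgeT hminT
          ((recs a (m + 1)).length) 0 (((recs a m).length : Int) + 1 - 1) none
          (by rw [hlen']; omega) (by omega) (by rw [hlen']; push_cast; omega)
          (by omega) (Or.inl (by have h9 := hT; rw [hlen'] at h9; push_cast; omega))
      refine ⟨ss.set (recs a m).length (some (a.getD m 0)), il.set (recs a m).length (some ((m : Nat) : Int)), by simp [hls], by simp [hli], hinv', ?_⟩
      rcases Nat.eq_zero_or_pos m with hm0 | hm0
      · -- m = 0: the `j == 0` disjunct fires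
        have hj0 : ((recs a m).length : Int) = 0 := by subst hm0; simp [recs]
        simp only [aStep]
        rw [hgm]
        simp only [aBody]
        rw [if_pos hj0]
        rw [PySem.List.pySet?_natCast _ _ _ (by omega : (recs a m).length < ss.length),
            PySem.List.pySet?_natCast _ _ _ (by omega : (recs a m).length < il.length)]
        simp only [aSetPair, aSearch]
        rw [hbs]
        simp only [aBs]
        rw [(hinv' ((recs a (m + 1)).idxOf (a.findIdx (fun y => decide (a.getD m 0 ≤ y)))) hT).2]
        simp only [aAns]
        rw [hRT, hlen']
        push_cast
        ring_nf
      · -- m ≥ 1: the last search-space value is < arr[m]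
        have hne : ¬ (((recs a m).length : Int) = 0) := by
          have := recs_length_pos a m hm0; omega
        have hcast : ((recs a m).length : Int) - 1 = (((recs a m).length - 1 : Nat) : Int) := by
          have := recs_length_pos a m hm0; omega
        simp only [aStep]
        rw [hgm]
        simp only [aBody]
        rw [if_neg hne, hcast,
            (hinv ((recs a m).length - 1) (by have := recs_length_pos a m hm0; omega)).1]
        simp only [aUpd]
        rw [if_pos ((branch_iff a m hm0).mpr hc)]
        rw [PySem.List.pySet?_natCast _ _ _ (by omega : (recs a m).length < ss.length),
            PySem.List.pySet?_natCast _ _ _ (by omega : (recs a m).length < il.length)]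
        simp only [aSetPair, aSearch]
        rw [hbs]
        simp only [aBs]
        rw [(hinv' ((recs a (m + 1)).idxOf (a.findIdx (fun y => decide (a.getD m 0 ≤ y)))) hT).2]
        simp only [aAns]
        rw [hRT, hlen']
        push_cast
        ring_nf
    · -- the m-th element is not appended
      have hm0 : 0 < m := by
        rcases Nat.eq_zero_or_pos m with h0 | h0
        · exfalso; rw [h0] at hc; simp [recPred] at hc
        · exact h0
      have hR' : recs a (m + 1) = recs a m := by rw [recs_succ, if_neg hc, List.append_nil]
      have hlen' : (recs a (m + 1)).length = (recs a m).length := by rw [hR']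
      have hinv' : ∀ t : Nat, t < (recs a (m + 1)).length →
          PySem.List.pyGet? ss (t : Int) = some (some (a.getD ((recs a (m + 1)).getD t 0) 0)) ∧
          PySem.List.pyGet? il (t : Int) = some (some (((recs a (m + 1)).getD t 0 : Nat) : Int)) := by
        intro t ht
        rw [hlen'] at ht
        rw [hR']
        exact hinv t ht
      have hbs : bsearch (ss) 0 (((recs a m).length : Int) - 1) (a.getD m 0) none = some ((((recs a (m + 1)).idxOf (a.findIdx (fun y => decide (a.getD m 0 ≤ y)))) : Nat) : Int) :=
        bsearch_correct (ss) (recs a (m + 1)).length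
          (fun t => a.getD ((recs a (m + 1)).getD t 0) 0)
          (fun t ht => (hinv' t ht).1) (recs_vals_mono a (m + 1)) (a.getD m 0)
          ((recs a (m + 1)).idxOf (a.findIdx (fun y => decide (a.getD m 0 ≤ y)))) hT hgeT hminT
          ((recs a (m + 1)).length) 0 (((recs a m).length : Int) - 1) none
          (by rw [hlen']; omega) (by omega) (by rw [hlen']; push_cast; omega)
          (by omega) (Or.inl (by have h9 := hT; rw [hlen'] at h9; push_cast; omega))
      refine ⟨ss, il, hls, hli, hinv', ?_⟩
      have hne : ¬ (((recs a m).length : Int) = 0) := by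
        have := recs_length_pos a m hm0; omega
      have hcast : ((recs a m).length : Int) - 1 = (((recs a m).length - 1 : Nat) : Int) := by
        have := recs_length_pos a m hm0; omega
      simp only [aStep]
      rw [hgm]
      simp only [aBody]
      rw [if_neg hne, hcast,
          (hinv ((recs a m).length - 1) (by have := recs_length_pos a m hm0; omega)).1]
      simp only [aUpd]
      rw [if_neg (by rw [branch_iff a m hm0]; exact hc)]
      simp only [aSearch]
      rw [hbs]
      simp only [aBs]
      rw [(hinv' ((recs a (m + 1)).idxOf (a.findIdx (fun y => decide (a.getD m 0 ≤ y)))) hT).2]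
      simp only [aAns]
      rw [hRT, hlen']

lemma main_eq (arr : List Int) (n : Int) (hpre : n ≤ (arr.length : Int)) :
    longestSubArr arr n = longestSubArr_alt arr n := by
  simp only [longestSubArr, longestSubArr_alt]
  by_cases hn : n ≤ 0
  · rw [PySem.List.pyRange_one_eq_nil hn]
    rfl
  · have hn' : 0 < n := by omega
    have h0 : PySem.List.pyRange 0 n 1 = (List.range n.toNat).map (fun k : Nat => (k : Int)) := by
      rw [PySem.List.pyRange_one]
      simp
    have hN : n.toNat ≤ arr.length := by omega
    obtain ⟨ss, il, -, -, -, hfold⟩ := loop_inv arr n.toNat hN n.toNat (Nat.le_refl _)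
    rw [h0, hfold]

-- ===== VERDICT (by name: the statement is the Claim_ definition above) =====
theorem longestSubArr_spec : Claim_equal_longestSubArr := by
  intro arr n _ hpre
  unfold Spec_longestSubArr
  exact main_eq arr n hpre
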